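-- pv_equiv track=rewrite | github.com/HappyTepid/AoC-2016 | day7_pt2.py | evaluateString
-- ===== SOURCE A (Python) =====
-- def splitInput(string):
--     non_bracks = []
--     bracks = []
--     buffer = ''
--     in_bracks = False
--     for char in string:
--         if not in_bracks:
--             if char != '[':
--                 buffer += char
--             else:
--                 # begin bracks
--                 non_bracks.append(buffer)
--                 buffer = ''
--                 in_bracks = True
--         else:
--             if char != ']':
--                 buffer += char
--             else:
--                 # end bracks
--                 bracks.append(buffer)
--                 buffer = ''
--                 in_bracks = False
--     if not in_bracks:
--         non_bracks.append(buffer)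
--     else:
--         bracks.append(buffer)
--     return non_bracks, bracks
--
-- def findABA(list_of_strings):
--     return_list = []
--     for sequence in list_of_strings:
--         char_minus_2 = ''
--         char_minus_1 = ''
--         current_char = ''
--         for char in sequence:
--             char_minus_2 = char_minus_1
--             char_minus_1 = current_char
--             current_char = char
--             if char_minus_2 == current_char and char_minus_1 != char_minus_2:
--                 return_list.append(char_minus_2+char_minus_1+current_char)
--     return return_list
--
-- def reverseABA(findABA_output):
--     return str(findABA_output[1]+findABA_output[0]+findABA_output[1])
--
-- def evaluateString(string):
--     non_bracks, bracks = splitInput(string)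
--     ABA = findABA(non_bracks)
--     for A in ABA:
--         for b in bracks:
--             if reverseABA(A) in b:
--                 return True
--     return False
-- ===== SOURCE B (Python) =====
-- def evaluateString(string):
--     outside = set()
--     inside = set()
--     in_brackets = False
--     p2 = p1 = None  # previous two characters of the current run
--     for ch in string:
--         if ch == (']' if in_brackets else '['):
--             in_brackets = not in_brackets
--             p2 = p1 = None
--         else:
--             if p2 is not None and p1 is not None and p2 == ch and p1 != ch:
--                 (inside if in_brackets else outside).add((ch, p1))
--             p2, p1 = p1, ch
--     return any((b, a) in inside for (a, b) in outside)
-- ===== Notes on version B (the rewrite author's own statement) =====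
-- stated objective: alternative
-- what changed: Replaced the multi-pass split-into-segments / collect-ABA-strings / nested substring-search structure by a single pass over the raw string with an in_brackets toggle and a two-character lag window that collects ABA pairs into two sets, finishing with a set-intersection-under-reversal test.
import Mathlib
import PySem

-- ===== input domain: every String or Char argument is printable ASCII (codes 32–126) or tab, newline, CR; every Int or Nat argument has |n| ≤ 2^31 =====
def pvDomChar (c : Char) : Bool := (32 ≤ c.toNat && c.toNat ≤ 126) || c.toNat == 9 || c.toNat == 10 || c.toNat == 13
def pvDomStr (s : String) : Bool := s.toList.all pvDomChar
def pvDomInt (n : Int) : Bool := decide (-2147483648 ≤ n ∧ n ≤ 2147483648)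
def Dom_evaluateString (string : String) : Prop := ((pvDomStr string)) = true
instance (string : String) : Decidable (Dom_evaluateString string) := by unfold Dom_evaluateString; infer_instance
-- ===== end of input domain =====

-- B replaces A's split / collect-ABA-strings / nested substring-search passes by one scan of the
-- raw string with an in_brackets toggle and a two-character lag window feeding two sets of ABA
-- pairs, finished by a set-intersection-under-reversal test (objective: alternative algorithm).

-- ===== PORT A =====
-- Python strings are ported as List Char (PySem convention).
def splitStepA (st : List (List Char) × List (List Char) × List Char × Bool) (c : Char) :
    List (List Char) × List (List Char) × List Char × Bool :=
  match st with
  | (nb, bk, buf, inb) =>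
    if !inb then
      if c ≠ '[' then (nb, bk, buf ++ [c], inb)
      else (nb ++ [buf], bk, [], true)
    else
      if c ≠ ']' then (nb, bk, buf ++ [c], inb)
      else (nb, bk ++ [buf], [], false)

def splitInputA (s : List Char) : List (List Char) × List (List Char) :=
  match s.foldl splitStepA ([], [], [], false) with
  | (nb, bk, buf, inb) => if !inb then (nb ++ [buf], bk) else (nb, bk ++ [buf])

-- char_minus_2 / char_minus_1 / current_char start as '' — ported as List Char ([] or a singleton)
def abaStepA (st : List (List Char) × List Char × List Char × List Char) (c : Char) :
    List (List Char) × List Char × List Char × List Char :=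
  match st with
  | (ret, _cm2, cm1, cur) =>
    let cm2' := cm1
    let cm1' := cur
    let cur' := [c]
    if cm2' = cur' ∧ cm1' ≠ cm2' then (ret ++ [cm2' ++ cm1' ++ cur'], cm2', cm1', cur')
    else (ret, cm2', cm1', cur')

def findABA_A (segs : List (List Char)) : List (List Char) :=
  segs.foldl (fun ret seg => (seg.foldl abaStepA (ret, [], [], [])).1) []

-- reverseABA: A[1]+A[0]+A[1]; every findABA element has length 3, so the fallback (where Python
-- would raise IndexError) is unreachable in A
def reverseABA_A (a : List Char) : List Char :=
  match PySem.List.pyGet? a 1, PySem.List.pyGet? a 0 with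
  | some x, some y => [x, y, x]
  | _, _ => []

def evaluateString (string : String) : Bool :=
  match splitInputA string.toList with
  | (nb, bk) =>
    (findABA_A nb).any (fun a => bk.any (fun b => PySem.Chars.isIn (reverseABA_A a) b))

-- ===== PORT B =====
def bStep (st : Bool × Option Char × Option Char × PySem.Set (Char × Char) × PySem.Set (Char × Char))
    (c : Char) :
    Bool × Option Char × Option Char × PySem.Set (Char × Char) × PySem.Set (Char × Char) :=
  match st with
  | (inb, p2, p1, outS, inS) =>
    if c = (if inb then ']' else '[') then (!inb, none, none, outS, inS)
    else
      let add1 : PySem.Set (Char × Char) → PySem.Set (Char × Char) := fun s =>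
        match p2, p1 with
        | some a, some b => if a = c ∧ b ≠ c then PySem.Set.add s (c, b) else s
        | _, _ => s
      if inb then (inb, p1, some c, outS, add1 inS)
      else (inb, p1, some c, add1 outS, inS)

def evaluateString_alt (string : String) : Bool :=
  match string.toList.foldl bStep (false, none, none, PySem.Set.empty, PySem.Set.empty) with
  | (_, _, _, outS, inS) => outS.any (fun p => PySem.Set.contains inS (p.2, p.1))

-- ===== PRECONDITION & SPEC =====
def Spec_evaluateString (string : String) (out : Bool) : Prop := out = evaluateString_alt string
instance (string : String) (out : Bool) : Decidable (Spec_evaluateString string out) := by unfold Spec_evaluateString; infer_instance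

-- ===== CLAIM (what is proved, stated in full; the proofs are below) =====
def Claim_equal_evaluateString : Prop := ∀ (string : String), Dom_evaluateString string → Spec_evaluateString string (evaluateString string)

-- ===== LEMMAS AND PROOFS =====

-- spec function for A's inner lag-3 scan
def detectA (p q : List Char) : List Char → List (List Char)
  | [] => []
  | c :: rest => (if p = [c] ∧ q ≠ p then [p ++ q ++ [c]] else []) ++ detectA q [c] rest

def headTri (c : Char) : List Char → List (List Char)
  | b :: a' :: _ => if c = a' ∧ b ≠ c then [[c, b, a']] else []
  | _ => []

lemma inner_scan (s : List Char) : ∀ (ret : List (List Char)) (cm2 cm1 cur : List Char),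
    (s.foldl abaStepA (ret, cm2, cm1, cur)).1 = ret ++ detectA cm1 cur s := by
  induction s with
  | nil => intro ret cm2 cm1 cur; simp [detectA]
  | cons c rest ih =>
      intro ret cm2 cm1 cur
      simp only [List.foldl_cons, abaStepA, detectA]
      split_ifs with h
      · rw [ih]; simp
      · rw [ih]; simp

lemma detect_cons (c : Char) (t : List Char) :
    detectA [] [] (c :: t) = headTri c t ++ detectA [] [] t := by
  match t with
  | [] => simp [detectA, headTri]
  | [b] => simp [detectA, headTri]
  | b :: a' :: rest =>
      simp only [detectA, headTri]
      simp [List.cons.injEq, eq_comm]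

lemma mem_detect (s : List Char) : ∀ x : List Char,
    x ∈ detectA [] [] s ↔ ∃ a b : Char, x = [a, b, a] ∧ a ≠ b ∧ [a, b, a] <:+: s := by
  induction s with
  | nil =>
      intro x
      simp [detectA, List.infix_nil]
  | cons c t ih =>
      intro x
      rw [detect_cons, List.mem_append, ih x]
      constructor
      · rintro (hx | ⟨a, b, rfl, hab, hinf⟩)
        · rcases t with _ | ⟨b0, _ | ⟨a0, t'⟩⟩
          · simp [headTri] at hx
          · simp [headTri] at hx
          · simp only [headTri] at hx
            split_ifs at hx with h
            · simp only [List.mem_singleton] at hx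
              subst hx
              obtain ⟨h1, h2⟩ := h
              subst h1
              exact ⟨c, b0, rfl, Ne.symm h2, ⟨[], t', rfl⟩⟩
            · simp at hx
        · exact ⟨a, b, rfl, hab, List.infix_cons_iff.mpr (Or.inr hinf)⟩
      · rintro ⟨a, b, rfl, hab, hinf⟩
        rcases List.infix_cons_iff.mp hinf with hpre | hinf'
        · left
          obtain ⟨r, hr⟩ := hpre
          simp only [List.cons_append, List.nil_append] at hr
          injection hr with h1 h2
          subst h1; subst h2
          simp [headTri, Ne.symm hab]
        · exact Or.inr ⟨a, b, rfl, hab, hinf'⟩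

lemma findABA_aux (segs : List (List Char)) : ∀ init : List (List Char),
    segs.foldl (fun ret seg => (seg.foldl abaStepA (ret, [], [], [])).1) init
      = init ++ segs.flatMap (detectA [] []) := by
  induction segs with
  | nil => intro init; simp
  | cons seg rest ih =>
      intro init
      simp only [List.foldl_cons, List.flatMap_cons]
      rw [inner_scan, ih, List.append_assoc]

lemma findABA_eq (segs : List (List Char)) :
    findABA_A segs = segs.flatMap (detectA [] []) := by
  simpa using findABA_aux segs []

lemma last2_iff (l : List Char) (a b : Char) :
    [a, b] <:+ l ↔ l.getLast? = some b ∧ l.dropLast.getLast? = some a := by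
  constructor
  · rintro ⟨t, rfl⟩
    constructor
    · rw [show t ++ [a, b] = (t ++ [a]) ++ [b] from by simp, List.getLast?_concat]
    · rw [show t ++ [a, b] = (t ++ [a]) ++ [b] from by simp, List.dropLast_concat,
        List.getLast?_concat]
  · rintro ⟨h1, h2⟩
    have hne : l ≠ [] := by rintro rfl; simp at h1
    have hne2 : l.dropLast ≠ [] := by intro h; rw [h] at h2; simp at h2
    have hb : l.getLast hne = b := by
      have h := List.getLast?_eq_getLast_of_ne_nil hne; rw [h] at h1; exact Option.some.inj h1
    have ha : l.dropLast.getLast hne2 = a := by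
      have h := List.getLast?_eq_getLast_of_ne_nil hne2; rw [h] at h2; exact Option.some.inj h2
    refine ⟨l.dropLast.dropLast, ?_⟩
    have e1 := List.dropLast_append_getLast hne
    have e2 := List.dropLast_append_getLast hne2
    rw [hb] at e1; rw [ha] at e2
    calc l.dropLast.dropLast ++ [a, b] = (l.dropLast.dropLast ++ [a]) ++ [b] := by simp
      _ = l.dropLast ++ [b] := by rw [e2]
      _ = l := e1

lemma infix_snoc (a b c : Char) (l : List Char) :
    [a, b, a] <:+: l ++ [c] ↔ [a, b, a] <:+: l ∨ (c = a ∧ [a, b] <:+ l) := by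
  constructor
  · rintro ⟨s, t, hst⟩
    rcases t.eq_nil_or_concat with rfl | ⟨t', c', rfl⟩
    · right
      simp only [List.append_nil] at hst
      have h2 : (s ++ [a, b]) ++ [a] = l ++ [c] := by
        rw [← hst]; simp
      have hc : c = a := by
        have h3 := congrArg List.getLast? h2
        simp only [List.getLast?_concat] at h3
        exact (Option.some.inj h3).symm
      have hl : s ++ [a, b] = l := by
        have h3 := congrArg List.dropLast h2
        simpa only [List.dropLast_concat] using h3
      exact ⟨hc, ⟨s, hl⟩⟩
    · left
      have h2 : (s ++ [a, b, a] ++ t') ++ [c'] = l ++ [c] := by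
        rw [← hst]; simp
      have hl : s ++ [a, b, a] ++ t' = l := by
        have h3 := congrArg List.dropLast h2
        simpa only [List.dropLast_concat] using h3
      exact ⟨s, t', hl⟩
  · rintro (⟨s, t, rfl⟩ | ⟨rfl, ⟨t, rfl⟩⟩)
    · exact ⟨s, t ++ [c], by simp⟩
    · exact ⟨t, [], by simp⟩

lemma mem_add1 (buf : List Char) (c : Char) (S : PySem.Set (Char × Char)) (L : List (List Char))
    (p2 p1 : Option Char) (h2 : p2 = buf.dropLast.getLast?) (h1 : p1 = buf.getLast?)
    (HS : ∀ a b : Char, (a, b) ∈ S ↔ a ≠ b ∧ ∃ seg ∈ L ++ [buf], [a, b, a] <:+: seg) :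
    ∀ a b : Char, ((a, b) ∈
        (match p2, p1 with
         | some a0, some b0 => if a0 = c ∧ b0 ≠ c then PySem.Set.add S (c, b0) else S
         | _, _ => S)) ↔
      a ≠ b ∧ ∃ seg ∈ L ++ [buf ++ [c]], [a, b, a] <:+: seg := by
  intro a b
  have hr : (a ≠ b ∧ ∃ seg ∈ L ++ [buf ++ [c]], [a, b, a] <:+: seg) ↔
      ((a ≠ b ∧ ∃ seg ∈ L ++ [buf], [a, b, a] <:+: seg) ∨ (a ≠ b ∧ c = a ∧ [a, b] <:+ buf)) := by
    constructor
    · rintro ⟨hab, seg, hseg, hinf⟩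
      rcases List.mem_append.mp hseg with h | h
      · exact Or.inl ⟨hab, seg, List.mem_append_left _ h, hinf⟩
      · have hseg' : seg = buf ++ [c] := by simpa using h
        subst hseg'
        rcases (infix_snoc a b c buf).mp hinf with h' | ⟨hc, hsfx⟩
        · exact Or.inl ⟨hab, buf, List.mem_append_right _ (by simp), h'⟩
        · exact Or.inr ⟨hab, hc, hsfx⟩
    · rintro (⟨hab, seg, hseg, hinf⟩ | ⟨hab, hc, hsfx⟩)
      · rcases List.mem_append.mp hseg with h | h
        · exact ⟨hab, seg, List.mem_append_left _ h, hinf⟩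
        · have hseg' : seg = buf := by simpa using h
          exact ⟨hab, buf ++ [c], by simp, (infix_snoc a b c buf).mpr (Or.inl (hseg' ▸ hinf))⟩
      · exact ⟨hab, buf ++ [c], by simp, (infix_snoc a b c buf).mpr (Or.inr ⟨hc, hsfx⟩)⟩
  rw [hr]
  rcases p2 with _ | a0
  · -- no char two back: nothing is added, and the new-triple case is impossible
    constructor
    · intro h; exact Or.inl ((HS a b).mp h)
    · rintro (h | ⟨hab, hc, hsfx⟩)
      · exact (HS a b).mpr h
      · exfalso
        have hx := (last2_iff buf a b).mp hsfx
        rw [← h2] at hx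
        exact absurd hx.2 (by simp)
  · rcases p1 with _ | b0
    · constructor
      · intro h; exact Or.inl ((HS a b).mp h)
      · rintro (h | ⟨hab, hc, hsfx⟩)
        · exact (HS a b).mpr h
        · exfalso
          have hx := (last2_iff buf a b).mp hsfx
          rw [← h1] at hx
          exact absurd hx.1 (by simp)
    · change ((a, b) ∈ if a0 = c ∧ b0 ≠ c then PySem.Set.add S (c, b0) else S) ↔
          (a ≠ b ∧ ∃ seg ∈ L ++ [buf], [a, b, a] <:+: seg) ∨ a ≠ b ∧ c = a ∧ [a, b] <:+ buf
      split_ifs with hd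
      · rw [PySem.Set.mem_add]
        constructor
        · rintro (h | hpair)
          · exact Or.inl ((HS a b).mp h)
          · rw [Prod.mk.injEq] at hpair
            obtain ⟨h3, h4⟩ := hpair
            refine Or.inr ⟨fun e => hd.2 (h4.symm.trans (e.symm.trans h3)), h3.symm, ?_⟩
            refine (last2_iff buf a b).mpr ⟨?_, ?_⟩
            · rw [h4]; exact h1.symm
            · rw [← h2, hd.1, ← h3]
        · rintro (h | ⟨hab, hc, hsfx⟩)
          · exact Or.inl ((HS a b).mpr h)
          · right
            obtain ⟨hb', ha'⟩ := (last2_iff buf a b).mp hsfx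
            rw [← h1] at hb'; rw [← h2] at ha'
            have hbb : b = b0 := (Option.some.inj hb'.symm)
            have haa : a = a0 := (Option.some.inj ha'.symm)
            rw [Prod.mk.injEq]
            exact ⟨hc.symm, hbb⟩
      · constructor
        · intro h; exact Or.inl ((HS a b).mp h)
        · rintro (h | ⟨hab, hc, hsfx⟩)
          · exact (HS a b).mpr h
          · exfalso
            obtain ⟨hb', ha'⟩ := (last2_iff buf a b).mp hsfx
            rw [← h1] at hb'; rw [← h2] at ha'
            have hbb : b = b0 := (Option.some.inj hb'.symm)
            have haa : a = a0 := (Option.some.inj ha'.symm)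
            exact hd ⟨haa.symm.trans hc.symm, fun e => hab (hc.symm.trans (e.symm.trans hbb.symm))⟩

lemma splitStepA_open (nb bk : List (List Char)) (buf : List Char) :
    splitStepA (nb, bk, buf, false) '[' = (nb ++ [buf], bk, [], true) := by simp [splitStepA]

lemma splitStepA_out (nb bk : List (List Char)) (buf : List Char) (c : Char) (h : c ≠ '[') :
    splitStepA (nb, bk, buf, false) c = (nb, bk, buf ++ [c], false) := by simp [splitStepA, h]

lemma splitStepA_close (nb bk : List (List Char)) (buf : List Char) :
    splitStepA (nb, bk, buf, true) ']' = (nb, bk ++ [buf], [], false) := by simp [splitStepA]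

lemma splitStepA_in (nb bk : List (List Char)) (buf : List Char) (c : Char) (h : c ≠ ']') :
    splitStepA (nb, bk, buf, true) c = (nb, bk, buf ++ [c], true) := by simp [splitStepA, h]

lemma bStep_open (p2 p1 : Option Char) (outS inS : PySem.Set (Char × Char)) :
    bStep (false, p2, p1, outS, inS) '[' = (true, none, none, outS, inS) := by simp [bStep]

lemma bStep_close (p2 p1 : Option Char) (outS inS : PySem.Set (Char × Char)) :
    bStep (true, p2, p1, outS, inS) ']' = (false, none, none, outS, inS) := by simp [bStep]

lemma bStep_out (p2 p1 : Option Char) (outS inS : PySem.Set (Char × Char)) (c : Char)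
    (h : c ≠ '[') : bStep (false, p2, p1, outS, inS) c =
    (false, p1, some c,
      (match p2, p1 with
       | some a0, some b0 => if a0 = c ∧ b0 ≠ c then PySem.Set.add outS (c, b0) else outS
       | _, _ => outS), inS) := by simp [bStep, h]

lemma bStep_in (p2 p1 : Option Char) (outS inS : PySem.Set (Char × Char)) (c : Char)
    (h : c ≠ ']') : bStep (true, p2, p1, outS, inS) c =
    (true, p1, some c, outS,
      (match p2, p1 with
       | some a0, some b0 => if a0 = c ∧ b0 ≠ c then PySem.Set.add inS (c, b0) else inS
       | _, _ => inS)) := by simp [bStep, h]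

lemma mainInv (cs : List Char) : ∀ (nb bk : List (List Char)) (buf : List Char) (inb : Bool)
    (outS inS : PySem.Set (Char × Char)),
    (∀ a b : Char, (a, b) ∈ outS ↔
        a ≠ b ∧ ∃ seg ∈ nb ++ cond inb [] [buf], [a, b, a] <:+: seg) →
    (∀ a b : Char, (a, b) ∈ inS ↔
        a ≠ b ∧ ∃ seg ∈ bk ++ cond inb [buf] [], [a, b, a] <:+: seg) →
    ∃ outS' inS',
      cs.foldl bStep (inb, buf.dropLast.getLast?, buf.getLast?, outS, inS)
        = ((cs.foldl splitStepA (nb, bk, buf, inb)).2.2.2,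
           (cs.foldl splitStepA (nb, bk, buf, inb)).2.2.1.dropLast.getLast?,
           (cs.foldl splitStepA (nb, bk, buf, inb)).2.2.1.getLast?,
           outS', inS')
      ∧ (∀ a b : Char, (a, b) ∈ outS' ↔
          a ≠ b ∧ ∃ seg ∈ (cs.foldl splitStepA (nb, bk, buf, inb)).1
              ++ cond (cs.foldl splitStepA (nb, bk, buf, inb)).2.2.2 []
                  [(cs.foldl splitStepA (nb, bk, buf, inb)).2.2.1], [a, b, a] <:+: seg)
      ∧ (∀ a b : Char, (a, b) ∈ inS' ↔
          a ≠ b ∧ ∃ seg ∈ (cs.foldl splitStepA (nb, bk, buf, inb)).2.1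
              ++ cond (cs.foldl splitStepA (nb, bk, buf, inb)).2.2.2
                  [(cs.foldl splitStepA (nb, bk, buf, inb)).2.2.1] [], [a, b, a] <:+: seg) := by
  induction cs with
  | nil =>
      intro nb bk buf inb outS inS Hout Hin
      exact ⟨outS, inS, rfl, Hout, Hin⟩
  | cons c cs ih =>
      intro nb bk buf inb outS inS Hout Hin
      cases inb with
      | false =>
          by_cases hc : c = '['
          · subst hc
            rw [List.foldl_cons, List.foldl_cons, splitStepA_open, bStep_open]
            refine ih (nb ++ [buf]) bk [] true outS inS ?_ ?_
            · intro a b; rw [Hout a b]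
              simp only [Bool.cond_false, Bool.cond_true, List.append_nil]
            · intro a b; rw [Hin a b]
              simp only [Bool.cond_false, Bool.cond_true, List.append_nil]
              refine and_congr_right fun _ => ?_
              constructor
              · rintro ⟨seg, hm, hi⟩; exact ⟨seg, List.mem_append_left _ hm, hi⟩
              · rintro ⟨seg, hm, hi⟩
                rcases List.mem_append.mp hm with hm | hm
                · exact ⟨seg, hm, hi⟩
                · have hseg : seg = ([] : List Char) := by simpa using hm
                  subst hseg
                  exact absurd (List.infix_nil.mp hi) (by simp)
          · rw [List.foldl_cons, List.foldl_cons, splitStepA_out nb bk buf c hc,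
              bStep_out _ _ outS inS c hc]
            have h := ih nb bk (buf ++ [c]) false _ inS
              (mem_add1 buf c outS nb _ _ rfl rfl Hout) Hin
            rw [List.dropLast_concat, List.getLast?_concat] at h
            exact h
      | true =>
          by_cases hc : c = ']'
          · subst hc
            rw [List.foldl_cons, List.foldl_cons, splitStepA_close, bStep_close]
            refine ih nb (bk ++ [buf]) [] false outS inS ?_ ?_
            · intro a b; rw [Hout a b]
              simp only [Bool.cond_false, Bool.cond_true, List.append_nil]
              refine and_congr_right fun _ => ?_
              constructor
              · rintro ⟨seg, hm, hi⟩; exact ⟨seg, List.mem_append_left _ hm, hi⟩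
              · rintro ⟨seg, hm, hi⟩
                rcases List.mem_append.mp hm with hm | hm
                · exact ⟨seg, hm, hi⟩
                · have hseg : seg = ([] : List Char) := by simpa using hm
                  subst hseg
                  exact absurd (List.infix_nil.mp hi) (by simp)
            · intro a b; rw [Hin a b]
              simp only [Bool.cond_false, Bool.cond_true, List.append_nil]
          · rw [List.foldl_cons, List.foldl_cons, splitStepA_in nb bk buf c hc,
              bStep_in _ _ outS inS c hc]
            have h := ih nb bk (buf ++ [c]) true outS _
              Hout (mem_add1 buf c inS bk _ _ rfl rfl Hin)
            rw [List.dropLast_concat, List.getLast?_concat] at h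
            exact h

lemma reverseABA_tri (a b : Char) : reverseABA_A [a, b, a] = [b, a, b] := by
  simp [reverseABA_A, PySem.List.pyGet?, PySem.List.pyIdx?]

lemma splitInputA_out (s : List Char) :
    (splitInputA s).1 = (s.foldl splitStepA ([], [], [], false)).1
      ++ cond (s.foldl splitStepA ([], [], [], false)).2.2.2 []
          [(s.foldl splitStepA ([], [], [], false)).2.2.1] := by
  unfold splitInputA
  rcases h : s.foldl splitStepA ([], [], [], false) with ⟨nb, bk, buf, inb⟩
  cases inb <;> simp

lemma splitInputA_in (s : List Char) :
    (splitInputA s).2 = (s.foldl splitStepA ([], [], [], false)).2.1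
      ++ cond (s.foldl splitStepA ([], [], [], false)).2.2.2
          [(s.foldl splitStepA ([], [], [], false)).2.2.1] [] := by
  unfold splitInputA
  rcases h : s.foldl splitStepA ([], [], [], false) with ⟨nb, bk, buf, inb⟩
  cases inb <;> simp

lemma A_true_iff (s : String) :
    evaluateString s = true ↔
      ∃ a b : Char, a ≠ b ∧ (∃ seg ∈ (splitInputA s.toList).1, [a, b, a] <:+: seg)
        ∧ ∃ t ∈ (splitInputA s.toList).2, [b, a, b] <:+: t := by
  unfold evaluateString
  rcases h : splitInputA s.toList with ⟨nb, bk⟩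
  rw [List.any_eq_true]
  constructor
  · rintro ⟨x, hx, hb⟩
    rw [List.any_eq_true] at hb
    obtain ⟨t, ht, hin⟩ := hb
    rw [findABA_eq, List.mem_flatMap] at hx
    obtain ⟨seg, hsegmem, hxseg⟩ := hx
    obtain ⟨a, b, rfl, hab, hinf⟩ := (mem_detect seg x).mp hxseg
    rw [reverseABA_tri, PySem.Chars.isIn_iff_infix] at hin
    exact ⟨a, b, hab, ⟨seg, hsegmem, hinf⟩, ⟨t, ht, hin⟩⟩
  · rintro ⟨a, b, hab, ⟨seg, hsegmem, hinf⟩, ⟨t, ht, hin⟩⟩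
    refine ⟨[a, b, a], ?_, ?_⟩
    · rw [findABA_eq, List.mem_flatMap]
      exact ⟨seg, hsegmem, (mem_detect seg _).mpr ⟨a, b, rfl, hab, hinf⟩⟩
    · rw [List.any_eq_true]
      refine ⟨t, ht, ?_⟩
      rw [reverseABA_tri, PySem.Chars.isIn_iff_infix]
      exact hin

lemma B_true_iff (s : String) :
    evaluateString_alt s = true ↔
      ∃ a b : Char, a ≠ b ∧ (∃ seg ∈ (splitInputA s.toList).1, [a, b, a] <:+: seg)
        ∧ ∃ t ∈ (splitInputA s.toList).2, [b, a, b] <:+: t := by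
  obtain ⟨outS', inS', hEq, Hout, Hin⟩ :=
    mainInv s.toList [] [] [] false PySem.Set.empty PySem.Set.empty
      (by intro a b
          constructor
          · intro h; exact absurd h (by simp [PySem.Set.empty])
          · rintro ⟨hab, seg, hm, hi⟩
            have hseg : seg = ([] : List Char) := by simpa using hm
            subst hseg
            exact absurd (List.infix_nil.mp hi) (by simp))
      (by intro a b
          constructor
          · intro h; exact absurd h (by simp [PySem.Set.empty])
          · rintro ⟨hab, seg, hm, hi⟩
            exact absurd hm (by simp))
  have hEq2 : s.toList.foldl bStep (false, none, none, PySem.Set.empty, PySem.Set.empty)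
      = ((s.toList.foldl splitStepA ([], [], [], false)).2.2.2,
         (s.toList.foldl splitStepA ([], [], [], false)).2.2.1.dropLast.getLast?,
         (s.toList.foldl splitStepA ([], [], [], false)).2.2.1.getLast?,
         outS', inS') := hEq
  have hval : evaluateString_alt s = outS'.any (fun p => PySem.Set.contains inS' (p.2, p.1)) := by
    unfold evaluateString_alt
    rw [hEq2]
  have hout_eq := splitInputA_out s.toList
  have hin_eq := splitInputA_in s.toList
  rw [hval, List.any_eq_true]
  constructor
  · rintro ⟨⟨a, b⟩, hp, hcon⟩
    obtain ⟨hab, seg, hm, hi⟩ := (Hout a b).mp hp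
    have hmem2 : ((b, a) : Char × Char) ∈ inS' := (PySem.Set.contains_iff inS' (b, a)).mp hcon
    obtain ⟨hba, t, htm, hti⟩ := (Hin b a).mp hmem2
    refine ⟨a, b, hab, ⟨seg, ?_, hi⟩, ⟨t, ?_, hti⟩⟩
    · rw [hout_eq]; exact hm
    · rw [hin_eq]; exact htm
  · rintro ⟨a, b, hab, ⟨seg, hm, hi⟩, ⟨t, htm, hti⟩⟩
    rw [hout_eq] at hm
    rw [hin_eq] at htm
    refine ⟨(a, b), (Hout a b).mpr ⟨hab, seg, hm, hi⟩, ?_⟩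
    exact (PySem.Set.contains_iff inS' (b, a)).mpr ((Hin b a).mpr ⟨Ne.symm hab, t, htm, hti⟩)

-- ===== VERDICT (by name: the statement is the Claim_ definition above) =====
theorem evaluateString_spec : Claim_equal_evaluateString := by
  intro s _
  unfold Spec_evaluateString
  have h := (A_true_iff s).trans (B_true_iff s).symm
  cases hA : evaluateString s <;> cases hB : evaluateString_alt s <;> simp_all
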